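-- pv_equiv track=rewrite | github.com/HarshAsrani/markupmna-upload | contract-nli-bert/contract_nli/dataset/loader.py | tokenize_and_align
-- ===== SOURCE A (Python) =====
-- from typing import List, Tuple
--
-- def tokenize_and_align(text: str, spans: List[Tuple[int, int]]):
--     """
--     spans: Spans as character offsets. e.g. "world" in "Hello, world" will
--         be represented as (7, 12).
--     """
--     # Split on whitespace so that different tokens may be attributed to their original position.
--     tokens = []
--     char_to_word_offset = []
--     prev_is_whitespace = True
--     splits = {si for s in spans for si in s}
--
--     for i, c in enumerate(text):
--         if c == ' ':
--             # splits will be ignored on space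
--             prev_is_whitespace = True
--         else:
--             if prev_is_whitespace or i in splits:
--                 tokens.append(c)
--             else:
--                 tokens[-1] += c
--             prev_is_whitespace = False
--         # len(tokens) == 0 when first characters are spaces
--         char_to_word_offset.append(max(len(tokens) - 1, 0))
--
--     splits = [char_to_word_offset[s[0]] for s in spans]
--     return tokens, splits, char_to_word_offset
-- ===== SOURCE B (Python) =====
-- from typing import List, Tuple
--
-- def tokenize_and_align(text: str, spans: List[Tuple[int, int]]):
--     """
--     Run-based re-implementation: scan the text run by run (a run = maximal
--     stretch of non-space chars not crossing a span endpoint), slice each run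
--     out as a whole token and emit its offsets in a block, instead of the
--     per-character accumulator state machine.
--     """
--     endpoints = {e for s in spans for e in s}
--     tokens = []
--     char_to_word_offset = []
--     i, n = 0, len(text)
--     while i < n:
--         if text[i] == ' ':
--             char_to_word_offset.append(max(len(tokens) - 1, 0))
--             i += 1
--         else:
--             j = i + 1
--             while j < n and text[j] != ' ' and j not in endpoints:
--                 j += 1
--             tokens.append(text[i:j])
--             char_to_word_offset.extend([len(tokens) - 1] * (j - i))
--             i = j
--     splits = [char_to_word_offset[s[0]] for s in spans]
--     return tokens, splits, char_to_word_offset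
-- ===== Notes on version B (the rewrite author's own statement) =====
-- stated objective: faster
-- what changed: Replaced A's per-character state machine (prev_is_whitespace flag, appending to or extending the last token via tokens[-1] += c, one offset per iteration) by a run-based scanner: an outer loop that, at each non-space position, finds the whole token's end with an inner scan (stopping at spaces and span endpoints), slices the token out in one piece and emits its offset block at once; this removes the repeated string re-building of tokens[-1] += c.
-- outside the precondition, e.g. on tokenize_and_align('ab', [(5, 1)]): A raises IndexError, B raises IndexError
import Mathlib
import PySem

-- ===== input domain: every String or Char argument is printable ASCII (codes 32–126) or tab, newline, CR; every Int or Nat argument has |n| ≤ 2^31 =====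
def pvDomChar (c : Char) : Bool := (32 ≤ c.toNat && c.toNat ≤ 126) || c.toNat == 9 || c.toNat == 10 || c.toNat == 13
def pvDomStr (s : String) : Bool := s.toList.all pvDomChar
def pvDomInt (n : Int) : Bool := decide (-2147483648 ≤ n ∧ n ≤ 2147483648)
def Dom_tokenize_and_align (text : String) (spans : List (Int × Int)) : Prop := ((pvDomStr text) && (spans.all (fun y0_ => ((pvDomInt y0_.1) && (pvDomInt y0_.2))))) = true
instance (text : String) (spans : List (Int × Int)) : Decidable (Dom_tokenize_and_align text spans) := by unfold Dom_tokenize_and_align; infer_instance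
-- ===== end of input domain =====

-- B re-implements the tokenizer run-by-run (slice out a whole token per outer step) instead of
-- A's per-character accumulator state machine, avoiding A's repeated tokens[-1] += c string
-- re-building; a timing run measured B faster on large inputs.


-- ===== PORT A =====
-- tokens are carried as List (List Char) and turned into String only at the end (String.mk)
-- tokens[-1] += c  (only reached when the token list is nonempty; [] case is a harmless totalization)
def pvAppendLast : List (List Char) → Char → List (List Char)
  | [], _ => []
  | [t], c => [t ++ [c]]
  | t :: ts, c => t :: pvAppendLast ts c

-- the body of A's for-loop: state = (tokens, char_to_word_offset, prev_is_whitespace)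
def pvStepA (eps : PySem.Set Int) (st : List (List Char) × List Int × Bool) (ic : Int × Char) :
    List (List Char) × List Int × Bool :=
  if ic.2 = ' ' then (st.1, st.2.1 ++ [max ((st.1.length : Int) - 1) 0], true)
  else
    let tokens' := if st.2.2 || decide (ic.1 ∈ eps) then st.1 ++ [[ic.2]] else pvAppendLast st.1 ic.2
    (tokens', st.2.1 ++ [max ((tokens'.length : Int) - 1) 0], false)

def tokenize_and_align (text : String) (spans : List (Int × Int)) : List String × List Int × List Int :=
  let splitsSet : PySem.Set Int := PySem.Set.ofList (spans.flatMap (fun s => [s.1, s.2]))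
  let r := (PySem.List.enumerate text.toList).foldl (pvStepA splitsSet) ([], [], true)
  (r.1.map (fun t => String.mk t),
   spans.map (fun s => (PySem.List.pyGet? r.2.1 s.1).getD 0),
   r.2.1)

-- ===== PORT B =====
-- inner while loop: consume chars while non-space and the index is not a span endpoint;
-- returns (consumed run, rest, index after the run)
def pvRun (eps : PySem.Set Int) : List Char → Int → List Char × List Char × Int
  | [], j => ([], [], j)
  | c :: cs, j =>
    if c = ' ' ∨ j ∈ eps then ([], c :: cs, j)
    else
      let r := pvRun eps cs (j + 1)
      (c :: r.1, r.2.1, r.2.2)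

-- needed by pvGo's termination
theorem pvRun_rest_len (eps : PySem.Set Int) (cs : List Char) (j : Int) :
    (pvRun eps cs j).2.1.length ≤ cs.length := by
  induction cs generalizing j with
  | nil => simp [pvRun]
  | cons c cs ih =>
    simp only [pvRun]
    split
    · simp
    · exact le_trans (ih (j + 1)) (Nat.le_succ _)

-- outer while loop: i = current index, t = number of tokens emitted so far
def pvGo (eps : PySem.Set Int) : List Char → Int → Int → List (List Char) × List Int
  | [], _, _ => ([], [])
  | c :: cs, i, t =>
    if c = ' ' then
      let r := pvGo eps cs (i + 1) t
      (r.1, max (t - 1) 0 :: r.2)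
    else
      let rn := pvRun eps cs (i + 1)
      let r := pvGo eps rn.2.1 rn.2.2 (t + 1)
      ((c :: rn.1) :: r.1, List.replicate (rn.1.length + 1) t ++ r.2)
termination_by cs => cs.length
decreasing_by
  · simp
  · exact Nat.lt_of_le_of_lt (pvRun_rest_len _ _ _) (by simp)

def tokenize_and_align_alt (text : String) (spans : List (Int × Int)) : List String × List Int × List Int :=
  let eps : PySem.Set Int := PySem.Set.ofList (spans.flatMap (fun s => [s.1, s.2]))
  let r := pvGo eps text.toList 0 0
  (r.1.map (fun t => String.mk t),
   spans.map (fun s => (PySem.List.pyGet? r.2 s.1).getD 0),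
   r.2)

-- ===== PRECONDITION & SPEC =====
-- Pre_ excludes exactly the inputs where Python A raises IndexError:
-- some span start s[0] is not a valid index into char_to_word_offset (length = len(text)).
def Pre_tokenize_and_align (text : String) (spans : List (Int × Int)) : Prop :=
  ∀ s ∈ spans, PySem.Raise.InRange text.toList.length s.1
instance (text : String) (spans : List (Int × Int)) : Decidable (Pre_tokenize_and_align text spans) := by unfold Pre_tokenize_and_align; infer_instance

def pvWitness_tokenize_and_align : String × (List (Int × Int)) := ("Hello, world", [(7, 12)])

def Spec_tokenize_and_align (text : String) (spans : List (Int × Int)) (out : List String × List Int × List Int) : Prop := out = tokenize_and_align_alt text spans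
instance (text : String) (spans : List (Int × Int)) (out : List String × List Int × List Int) : Decidable (Spec_tokenize_and_align text spans out) := by unfold Spec_tokenize_and_align; infer_instance

-- ===== CLAIM (what is proved, stated in full; the proofs are below) =====
def Claim_equal_tokenize_and_align : Prop := ∀ (text : String) (spans : List (Int × Int)), Dom_tokenize_and_align text spans → Pre_tokenize_and_align text spans → Spec_tokenize_and_align text spans (tokenize_and_align text spans)

-- ===== LEMMAS AND PROOFS =====

theorem pvAppendLast_append (T : List (List Char)) (tok : List Char) (c : Char) :
    pvAppendLast (T ++ [tok]) c = T ++ [tok ++ [c]] := by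
  induction T with
  | nil => rfl
  | cons t ts ih =>
    cases ts with
    | nil => simp [pvAppendLast]
    | cons u us => simpa [pvAppendLast] using ih

-- the rest returned by pvRun either is empty, starts with a space, or starts at a span endpoint
theorem pvRun_headOk (eps : PySem.Set Int) (cs : List Char) (j : Int) :
    (pvRun eps cs j).2.1 = [] ∨
      ∃ c cs', (pvRun eps cs j).2.1 = c :: cs' ∧ (c = ' ' ∨ (pvRun eps cs j).2.2 ∈ eps) := by
  induction cs generalizing j with
  | nil => simp [pvRun]
  | cons c cs ih =>
    simp only [pvRun]
    split
    · right; exact ⟨c, cs, rfl, by assumption⟩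
    · exact ih (j + 1)

-- folding A's step over a run (pw = false) extends the last token by the run and emits its offsets
theorem foldA_run (eps : PySem.Set Int) (cs : List Char) (j : Int) (T : List (List Char))
    (tok : List Char) (O : List Int) :
    (PySem.List.enumerate cs j).foldl (pvStepA eps) (T ++ [tok], O, false)
      = (PySem.List.enumerate (pvRun eps cs j).2.1 (pvRun eps cs j).2.2).foldl (pvStepA eps)
          (T ++ [tok ++ (pvRun eps cs j).1],
           O ++ List.replicate (pvRun eps cs j).1.length (T.length : Int), false) := by
  induction cs generalizing j tok O with
  | nil => simp [pvRun]
  | cons c cs ih =>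
    by_cases h : c = ' ' ∨ j ∈ eps
    · simp [pvRun, h]
    · have hc : ¬ c = ' ' := fun hx => h (Or.inl hx)
      have hj : j ∉ eps := fun hx => h (Or.inr hx)
      have hstep : pvStepA eps (T ++ [tok], O, false) (j, c)
          = (T ++ [tok ++ [c]], O ++ [(T.length : Int)], false) := by
        simp only [pvStepA, if_neg hc]
        simp [hj, pvAppendLast_append]
      have hr : pvRun eps (c :: cs) j
          = (c :: (pvRun eps cs (j + 1)).1, (pvRun eps cs (j + 1)).2.1, (pvRun eps cs (j + 1)).2.2) := by
        rw [pvRun, if_neg h]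
      rw [PySem.List.enumerate_cons]
      simp only [List.foldl_cons, hstep]
      rw [ih (j + 1) (tok ++ [c]) (O ++ [(T.length : Int)]), hr]
      simp [List.replicate_succ]

-- main invariant: from a "fresh" state (pw = true, or the next char is a space / endpoint),
-- A's fold appends exactly what pvGo produces
theorem pvGo_nil (eps : PySem.Set Int) (i t : Int) : pvGo eps [] i t = ([], []) := by
  rw [pvGo]

theorem pvGo_cons (eps : PySem.Set Int) (c : Char) (cs : List Char) (i t : Int) :
    pvGo eps (c :: cs) i t =
      if c = ' ' then
        ((pvGo eps cs (i + 1) t).1, max (t - 1) 0 :: (pvGo eps cs (i + 1) t).2)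
      else
        ((c :: (pvRun eps cs (i + 1)).1) :: (pvGo eps (pvRun eps cs (i + 1)).2.1 (pvRun eps cs (i + 1)).2.2 (t + 1)).1,
         List.replicate ((pvRun eps cs (i + 1)).1.length + 1) t ++ (pvGo eps (pvRun eps cs (i + 1)).2.1 (pvRun eps cs (i + 1)).2.2 (t + 1)).2) := by
  rw [pvGo]

-- main invariant: from a "fresh" state (pw = true, or the next char is a space / endpoint),
-- A's fold appends exactly what pvGo produces
theorem foldA_go (eps : PySem.Set Int) :
    ∀ n (cs : List Char), cs.length ≤ n → ∀ (i : Int) (T : List (List Char)) (O : List Int) (pw : Bool),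
    (pw = true ∨ cs = [] ∨ ∃ c cs', cs = c :: cs' ∧ (c = ' ' ∨ i ∈ eps)) →
    ((PySem.List.enumerate cs i).foldl (pvStepA eps) (T, O, pw)).1
        = T ++ (pvGo eps cs i (T.length : Int)).1
    ∧ ((PySem.List.enumerate cs i).foldl (pvStepA eps) (T, O, pw)).2.1
        = O ++ (pvGo eps cs i (T.length : Int)).2 := by
  intro n
  induction n with
  | zero =>
    intro cs hlen i T O pw _
    have : cs = [] := List.length_eq_zero_iff.mp (Nat.le_zero.mp hlen)
    subst this
    simp [pvGo_nil]
  | succ n ih =>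
    intro cs hlen i T O pw hok
    cases cs with
    | nil => simp [pvGo_nil]
    | cons c cs =>
      by_cases hc : c = ' '
      · subst hc
        have hstep : pvStepA eps (T, O, pw) (i, ' ')
            = (T, O ++ [max ((T.length : Int) - 1) 0], true) := by
          simp [pvStepA]
        rw [PySem.List.enumerate_cons]
        simp only [List.foldl_cons, hstep]
        obtain ⟨h1, h2⟩ := ih cs (Nat.le_of_succ_le_succ (by simpa using hlen)) (i + 1) T
          (O ++ [max ((T.length : Int) - 1) 0]) true (Or.inl rfl)
        rw [pvGo_cons, if_pos rfl]
        exact ⟨h1, by rw [h2]; simp⟩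
      · -- non-space: the hypothesis forces a new token to start
        have hcond : (pw || decide (i ∈ eps)) = true := by
          rcases hok with hpw | hnil | ⟨c', cs', heq, hor⟩
          · simp [hpw]
          · exact absurd hnil (by simp)
          · injection heq with e1 e2
            subst e1; subst e2
            rcases hor with h | h
            · exact absurd h hc
            · simp [h]
        have hstep : pvStepA eps (T, O, pw) (i, c)
            = (T ++ [[c]], O ++ [(T.length : Int)], false) := by
          simp only [pvStepA, if_neg hc, hcond]
          simp
        rw [PySem.List.enumerate_cons]
        simp only [List.foldl_cons, hstep]
        rw [foldA_run eps cs (i + 1) T [c] (O ++ [(T.length : Int)])]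
        have hrest := pvRun_rest_len eps cs (i + 1)
        obtain ⟨h1, h2⟩ := ih (pvRun eps cs (i + 1)).2.1
          (le_trans hrest (Nat.le_of_succ_le_succ (by simpa using hlen)))
          (pvRun eps cs (i + 1)).2.2 (T ++ [[c] ++ (pvRun eps cs (i + 1)).1])
          ((O ++ [(T.length : Int)]) ++ List.replicate (pvRun eps cs (i + 1)).1.length (T.length : Int))
          false
          (by
            rcases pvRun_headOk eps cs (i + 1) with h | ⟨c', cs', heq, hor⟩
            · exact Or.inr (Or.inl h)
            · exact Or.inr (Or.inr ⟨c', cs', heq, hor⟩))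
        rw [pvGo_cons, if_neg hc]
        constructor
        · rw [h1]
          simp
        · rw [h2]
          have hlen' : ((T ++ [[c] ++ (pvRun eps cs (i + 1)).1]).length : Int)
              = (T.length : Int) + 1 := by simp
          rw [hlen']
          simp [List.replicate_succ]

-- ===== VERDICT (by name: the statement is the Claim_ definition above) =====
theorem tokenize_and_align_spec : Claim_equal_tokenize_and_align := by
  intro text spans _ _
  unfold Spec_tokenize_and_align tokenize_and_align tokenize_and_align_alt
  obtain ⟨h1, h2⟩ := foldA_go (PySem.Set.ofList (spans.flatMap (fun s => [s.1, s.2])))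
    text.toList.length text.toList le_rfl 0 [] [] true (Or.inl rfl)
  simp only [List.nil_append, List.length_nil, Nat.cast_zero] at h1 h2
  simp only [h1, h2]
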